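-- pv_equiv track=rewrite | github.com/User765435/USAS-UCREL-PL | app.py | split_phrase_to_tokens
-- ===== SOURCE A (Python) =====
-- SPECIAL_DELIMS = set("-'°&")
--
-- def split_phrase_to_tokens(phrase: str):
--     """Split a phrase into tokens, keeping special delimiters as their own tokens.
--
--     Whitespace is used to separate tokens. Any character in SPECIAL_DELIMS
--     is treated as a separate token so that multi-word expressions containing
--     characters like '-', '\'', '°', '&' can be matched against tokenized
--     input where those characters may be separated.
--     The input should already be lowered/normalized before splitting.
--     """
--     tokens = []
--     current = ''
--     for ch in phrase:
--         if ch.isspace():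
--             if current:
--                 tokens.append(current)
--                 current = ''
--         elif ch in SPECIAL_DELIMS:
--             if current:
--                 tokens.append(current)
--                 current = ''
--             tokens.append(ch)
--         else:
--             current += ch
--     if current:
--         tokens.append(current)
--     return tokens
-- ===== SOURCE B (Python) =====
-- SPECIAL_DELIMS = set("-'°&")
--
-- def split_phrase_to_tokens(phrase: str):
--     """Index-based scanner: skip whitespace, emit a special delimiter as its own
--     token, otherwise slice out the maximal run of plain characters in one step.
--     No (tokens, current) accumulator state machine."""
--     tokens = []
--     n = len(phrase)
--     i = 0
--     while i < n:
--         ch = phrase[i]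
--         if ch.isspace():
--             i += 1
--         elif ch in SPECIAL_DELIMS:
--             tokens.append(ch)
--             i += 1
--         else:
--             j = i + 1
--             while j < n and not phrase[j].isspace() and phrase[j] not in SPECIAL_DELIMS:
--                 j += 1
--             tokens.append(phrase[i:j])
--             i = j
--     return tokens
-- ===== Notes on version B (the rewrite author's own statement) =====
-- stated objective: alternative
-- what changed: A's single character-by-character pass with a (tokens, current) accumulator state machine is replaced by an index-based scanner that skips whitespace, emits special delimiters directly, and slices out each maximal run of plain characters in one inner step, so no partial-token accumulator is ever kept.
import Mathlib
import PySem

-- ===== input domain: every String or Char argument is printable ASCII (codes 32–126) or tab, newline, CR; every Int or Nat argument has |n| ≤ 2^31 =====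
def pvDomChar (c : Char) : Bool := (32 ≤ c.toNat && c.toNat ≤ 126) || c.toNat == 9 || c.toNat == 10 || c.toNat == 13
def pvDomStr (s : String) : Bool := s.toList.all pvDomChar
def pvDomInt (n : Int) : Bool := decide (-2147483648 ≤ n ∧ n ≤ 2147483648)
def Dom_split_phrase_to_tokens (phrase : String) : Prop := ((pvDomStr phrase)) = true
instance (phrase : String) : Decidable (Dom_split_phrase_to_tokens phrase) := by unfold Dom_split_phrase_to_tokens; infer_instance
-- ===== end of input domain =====

-- B replaces A's (tokens, current)-accumulator state machine by an index-free scanner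
-- that skips whitespace and slices out each maximal plain run in one step; same cost.

def SPECIAL_DELIMS : List Char := PySem.Set.ofList ['-', '\'', '°', '&']

-- ===== PORT A =====
-- one step of A's `for ch in phrase` loop; state = (tokens, current)
def pvStepA (st : List String × List Char) (c : Char) : List String × List Char :=
  if PySem.Chars.isspace c then
    (if st.2.isEmpty then st else (st.1 ++ [String.ofList st.2], []))
  else if SPECIAL_DELIMS.contains c then
    ((if st.2.isEmpty then st.1 else st.1 ++ [String.ofList st.2]) ++ [String.ofList [c]], [])
  else (st.1, st.2 ++ [c])

def split_phrase_to_tokens (phrase : String) : List String :=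
  let st := phrase.toList.foldl pvStepA ([], [])
  if st.2.isEmpty then st.1 else st.1 ++ [String.ofList st.2]

-- ===== PORT B =====
-- a "plain" character: the inner-while condition of Source B
def pvPlain (c : Char) : Bool := !PySem.Chars.isspace c && !SPECIAL_DELIMS.contains c

-- Source B's outer while loop as structural recursion on the remaining characters;
-- the inner while that advances j over plain characters is takeWhile/dropWhile
def pvScan : List Char → List String
  | [] => []
  | c :: rest =>
    if PySem.Chars.isspace c then pvScan rest
    else if SPECIAL_DELIMS.contains c then String.ofList [c] :: pvScan rest
    else String.ofList (c :: rest.takeWhile pvPlain) :: pvScan (rest.dropWhile pvPlain)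
termination_by l => l.length
decreasing_by
  · simp
  · simp
  · exact Nat.lt_succ_of_le (List.length_dropWhile_le pvPlain rest)

def split_phrase_to_tokens_alt (phrase : String) : List String := pvScan phrase.toList

-- ===== PRECONDITION & SPEC =====
def Spec_split_phrase_to_tokens (phrase : String) (out : List String) : Prop := out = split_phrase_to_tokens_alt phrase
instance (phrase : String) (out : List String) : Decidable (Spec_split_phrase_to_tokens phrase out) := by unfold Spec_split_phrase_to_tokens; infer_instance

-- ===== CLAIM (what is proved, stated in full; the proofs are below) =====
def Claim_equal_split_phrase_to_tokens : Prop := ∀ (phrase : String), Dom_split_phrase_to_tokens phrase → Spec_split_phrase_to_tokens phrase (split_phrase_to_tokens phrase)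

-- ===== LEMMAS AND PROOFS =====

def pvFinish (st : List String × List Char) : List String :=
  if st.2.isEmpty then st.1 else st.1 ++ [String.ofList st.2]

theorem pvScan_nil : pvScan [] = [] := by rw [pvScan.eq_def]

theorem pvScan_cons (c : Char) (rest : List Char) :
    pvScan (c :: rest) =
      if PySem.Chars.isspace c then pvScan rest
      else if SPECIAL_DELIMS.contains c then String.ofList [c] :: pvScan rest
      else String.ofList (c :: rest.takeWhile pvPlain) :: pvScan (rest.dropWhile pvPlain) := by
  rw [pvScan.eq_def]

-- already-emitted tokens are a passive prefix of A's loop state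
theorem foldA_prefix (l : List Char) : ∀ (toks : List String) (run : List Char),
    List.foldl pvStepA (toks, run) l =
      (toks ++ (List.foldl pvStepA ([], run) l).1, (List.foldl pvStepA ([], run) l).2) := by
  induction l with
  | nil => intro toks run; simp
  | cons c rest ih =>
    intro toks run
    simp only [List.foldl]
    by_cases hs : PySem.Chars.isspace c
    · by_cases he : run.isEmpty
      · rw [show pvStepA (toks, run) c = (toks, run) by simp [pvStepA, hs, he],
          show pvStepA (([] : List String), run) c = ([], run) by simp [pvStepA, hs, he],
          ih toks run]
      · rw [show pvStepA (toks, run) c = (toks ++ [String.ofList run], []) by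
            simp [pvStepA, hs, he],
          show pvStepA (([] : List String), run) c = ([String.ofList run], []) by
            simp [pvStepA, hs, he], ih, ih [String.ofList run]]
        simp
    · by_cases hd : SPECIAL_DELIMS.contains c
      · have hd' : c ∈ SPECIAL_DELIMS := by simpa using hd
        by_cases he : run.isEmpty
        · rw [show pvStepA (toks, run) c = (toks ++ [String.ofList [c]], []) by
              simp [pvStepA, hs, hd', he],
            show pvStepA (([] : List String), run) c = ([String.ofList [c]], []) by
              simp [pvStepA, hs, hd', he], ih, ih [String.ofList [c]]]
          simp
        · rw [show pvStepA (toks, run) c = (toks ++ [String.ofList run] ++ [String.ofList [c]], []) by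
              simp [pvStepA, hs, hd', he],
            show pvStepA (([] : List String), run) c = ([String.ofList run] ++ [String.ofList [c]], []) by
              simp [pvStepA, hs, hd', he], ih, ih ([String.ofList run] ++ [String.ofList [c]])]
          simp
      · have hd' : c ∉ SPECIAL_DELIMS := by simpa using hd
        rw [show pvStepA (toks, run) c = (toks, run ++ [c]) by simp [pvStepA, hs, hd'],
          show pvStepA (([] : List String), run) c = ([], run ++ [c]) by simp [pvStepA, hs, hd'],
          ih toks (run ++ [c])]

-- a block of plain characters is absorbed into A's current run
theorem foldA_plain (w : List Char) : ∀ (toks : List String) (run : List Char),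
    (∀ c ∈ w, pvPlain c = true) →
    List.foldl pvStepA (toks, run) w = (toks, run ++ w) := by
  induction w with
  | nil => intro toks run _; simp
  | cons c rest ih =>
    intro toks run h
    have hc := h c (by simp)
    have hs : ¬ PySem.Chars.isspace c = true := by
      simp [pvPlain] at hc; simp [hc.1]
    have hd : c ∉ SPECIAL_DELIMS := by
      simp [pvPlain] at hc; simpa using hc.2
    simp only [List.foldl]
    rw [show pvStepA (toks, run) c = (toks, run ++ [c]) by simp [pvStepA, hs, hd],
      ih toks (run ++ [c]) (fun d hd' => h d (by simp [hd']))]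
    simp

-- the core equivalence, by strong induction on the length
theorem pv_main : ∀ (n : ℕ) (l : List Char), l.length ≤ n →
    pvFinish (List.foldl pvStepA ([], []) l) = pvScan l := by
  intro n
  induction n with
  | zero =>
    intro l hl
    rw [List.length_eq_zero_iff.mp (Nat.le_zero.mp hl)]
    simp [pvFinish, pvScan_nil]
  | succ n ih =>
    intro l hl
    match l with
    | [] => simp [pvFinish, pvScan_nil]
    | c :: rest =>
      by_cases hs : PySem.Chars.isspace c
      · have h1 : pvStepA ([], []) c = ([], []) := by simp [pvStepA, hs]
        rw [pvScan_cons, if_pos hs]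
        simp only [List.foldl, h1]
        exact ih rest (by simpa using Nat.le_of_succ_le_succ hl)
      · by_cases hd : SPECIAL_DELIMS.contains c
        · have hd' : c ∈ SPECIAL_DELIMS := by simpa using hd
          have h1 : pvStepA (([] : List String), ([] : List Char)) c
              = ([String.ofList [c]], []) := by simp [pvStepA, hs, hd']
          rw [pvScan_cons, if_neg hs, if_pos hd]
          simp only [List.foldl, h1]
          rw [foldA_prefix rest [String.ofList [c]] []]
          rw [← ih rest (by simpa using Nat.le_of_succ_le_succ hl)]
          unfold pvFinish
          split <;> simp
        · -- plain character: c starts a maximal plain run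
          have hd2 : c ∉ SPECIAL_DELIMS := by simpa using hd
          have hwp : ∀ d ∈ rest.takeWhile pvPlain, pvPlain d = true :=
            fun d hd' => List.mem_takeWhile_imp hd'
          have h1 : pvStepA (([] : List String), ([] : List Char)) c = ([], [c]) := by
            simp [pvStepA, hs, hd2]
          have h2 : List.foldl pvStepA ([], [c]) rest
              = List.foldl pvStepA ([], c :: rest.takeWhile pvPlain) (rest.dropWhile pvPlain) := by
            conv_lhs => rw [← List.takeWhile_append_dropWhile (p := pvPlain) (l := rest)]
            rw [List.foldl_append, foldA_plain _ [] [c] hwp]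
            simp
          rw [pvScan_cons, if_neg hs, if_neg hd]
          simp only [List.foldl, h1, h2]
          cases hrc : rest.dropWhile pvPlain with
          | nil => simp [pvFinish, pvScan_nil]
          | cons c' r' =>
            have hc' : pvPlain c' = false := by
              have := List.head?_dropWhile_not pvPlain rest
              rw [hrc] at this
              simpa using this
            have hr'len : r'.length ≤ n := by
              have h3 : (c' :: r').length ≤ rest.length :=
                hrc ▸ List.length_dropWhile_le pvPlain rest
              simp only [List.length_cons] at h3 hl
              omega
            by_cases hs' : PySem.Chars.isspace c'
            · have h3 : pvStepA (([] : List String), c :: rest.takeWhile pvPlain) c'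
                  = ([String.ofList (c :: rest.takeWhile pvPlain)], []) := by
                simp [pvStepA, hs']
              simp only [List.foldl, h3]
              rw [foldA_prefix r' [String.ofList (c :: rest.takeWhile pvPlain)] [],
                pvScan_cons, if_pos hs', ← ih r' hr'len]
              unfold pvFinish
              split <;> simp
            · have hd3 : c' ∈ SPECIAL_DELIMS := by
                simp [pvPlain, hs'] at hc'; simpa using hc'
              have h3 : pvStepA (([] : List String), c :: rest.takeWhile pvPlain) c'
                  = ([String.ofList (c :: rest.takeWhile pvPlain), String.ofList [c']], []) := by
                simp [pvStepA, hs', hd3]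
              simp only [List.foldl, h3]
              rw [foldA_prefix r' [String.ofList (c :: rest.takeWhile pvPlain), String.ofList [c']] [],
                pvScan_cons, if_neg hs', if_pos (by simpa using hd3), ← ih r' hr'len]
              unfold pvFinish
              split <;> simp

-- ===== VERDICT (by name: the statement is the Claim_ definition above) =====
theorem split_phrase_to_tokens_spec : Claim_equal_split_phrase_to_tokens := by
  intro phrase _
  unfold Spec_split_phrase_to_tokens split_phrase_to_tokens split_phrase_to_tokens_alt
  have := pv_main phrase.toList.length phrase.toList (le_refl _)
  unfold pvFinish at this
  simpa using this
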